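-- pv_equiv track=rewrite | github.com/giacomettisss/password_brute_force | main.py | gera_lst
-- ===== SOURCE A (Python) =====
-- def gera_lst(chars):
--     lst = []
--     for i in chars:
--         k = [i + chars]
--         j = dict.fromkeys(k[0]).keys()
--         j = list(j)
--         lst.append([''.join(j)])
--     return lst
-- ===== SOURCE B (Python) =====
-- def gera_lst(chars):
--     unique = list(dict.fromkeys(chars))
--     return [[i + ''.join(c for c in unique if c != i)] for i in chars]
-- ===== Notes on version B (the rewrite author's own statement) =====
-- stated objective: faster
-- what changed: Deduplicate the character sequence once up front and build each entry as i followed by the distinct chars excluding i, instead of re-running dict.fromkeys on i+chars for every position.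
import Mathlib
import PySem

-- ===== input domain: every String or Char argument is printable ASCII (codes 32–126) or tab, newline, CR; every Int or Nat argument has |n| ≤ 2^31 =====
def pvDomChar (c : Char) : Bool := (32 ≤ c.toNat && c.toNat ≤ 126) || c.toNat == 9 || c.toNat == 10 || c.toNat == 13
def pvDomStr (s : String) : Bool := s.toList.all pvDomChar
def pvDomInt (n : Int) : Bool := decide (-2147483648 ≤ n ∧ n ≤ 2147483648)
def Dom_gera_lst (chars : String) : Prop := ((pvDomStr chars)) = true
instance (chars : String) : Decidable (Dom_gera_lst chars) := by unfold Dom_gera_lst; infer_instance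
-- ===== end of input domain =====

-- B deduplicates the characters once up front instead of re-deduplicating i+chars for every
-- position i (objective: faster — O(n*u) with a single dedup vs A's O(n^2); same return value).

-- ===== PORT A =====
-- for i in chars: k = [i + chars]; j = list(dict.fromkeys(k[0])); lst.append([''.join(j)])
def gera_lst (chars : String) : List (List String) :=
  chars.toList.foldl (fun lst i =>
    let k : List String := [String.ofList (i :: chars.toList)]   -- k = [i + chars]
    let j : List Char := PySem.List.dedup ((k.headD "").toList)  -- dict.fromkeys(k[0]) on the singleton k
    lst ++ [[String.ofList j]]) []

-- ===== PORT B =====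
-- unique = list(dict.fromkeys(chars)); [[i + ''.join(c for c in unique if c != i)] for i in chars]
def gera_lst_alt (chars : String) : List (List String) :=
  let unique : List Char := PySem.List.dedup chars.toList
  chars.toList.map (fun i => [String.ofList (i :: unique.filter (fun c => c ≠ i))])

-- ===== PRECONDITION & SPEC =====
def Spec_gera_lst (chars : String) (out : List (List String)) : Prop := out = gera_lst_alt chars
instance (chars : String) (out : List (List String)) : Decidable (Spec_gera_lst chars out) := by unfold Spec_gera_lst; infer_instance

-- ===== CLAIM (what is proved, stated in full; the proofs are below) =====
def Claim_equal_gera_lst : Prop := ∀ (chars : String), Dom_gera_lst chars → Spec_gera_lst chars (gera_lst chars)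

-- ===== LEMMAS AND PROOFS =====

-- appending singletons in a left fold is a map
theorem pv_foldl_append_map {α β : Type} (f : α → β) (l : List α) (acc : List β) :
    l.foldl (fun lst i => lst ++ [f i]) acc = acc ++ l.map f := by
  induction l generalizing acc with
  | nil => simp
  | cons x t ih => simp [List.foldl, ih]

-- folding Set.add over a head-extended accumulator: the head stays in front and
-- later equal elements are absorbed
theorem pv_foldl_add_cons {α : Type} [DecidableEq α] (l : List α) (s : List α) (a : α) :
    l.foldl PySem.Set.add (a :: s) =
      a :: (l.filter (fun x => x ≠ a)).foldl PySem.Set.add s := by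
  induction l generalizing s with
  | nil => simp
  | cons x t ih =>
    by_cases hx : x = a
    · subst hx
      have h1 : PySem.Set.add (x :: s) x = x :: s := by
        simp [PySem.Set.add]
      simp [List.foldl, h1, ih]
    · have h1 : PySem.Set.add (a :: s) x = a :: PySem.Set.add s x := by
        by_cases hm : x ∈ s
        · simp [PySem.Set.add, hm, hx]
        · simp [PySem.Set.add, hm, hx]
      simp [List.foldl, hx, h1, ih]

-- dedup commutes with filter (via the Set.add fold)
theorem pv_foldl_add_filter {α : Type} [DecidableEq α] (p : α → Bool) (l : List α) (s : List α) :
    (l.foldl PySem.Set.add s).filter p = (l.filter p).foldl PySem.Set.add (s.filter p) := by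
  induction l generalizing s with
  | nil => simp
  | cons x t ih =>
    by_cases hp : p x = true
    · have h1 : (PySem.Set.add s x).filter p = PySem.Set.add (s.filter p) x := by
        by_cases hm : x ∈ s
        · simp [PySem.Set.add, hm, hp, List.mem_filter]
        · have hnf : x ∉ s.filter p := fun h => hm (List.mem_filter.mp h).1
          simp [PySem.Set.add, hm, hnf, List.filter_append, hp, List.mem_filter]
      simp [List.foldl, hp, h1, ih]
    · have h1 : (PySem.Set.add s x).filter p = s.filter p := by
        by_cases hm : x ∈ s
        · simp [PySem.Set.add, hm]
        · simp [PySem.Set.add, hm, List.filter_append, hp]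
      simp [List.foldl, hp, h1, ih]

-- the key identity: deduplicating a :: l is a followed by the deduplicated l minus a
theorem pv_dedup_cons {α : Type} [DecidableEq α] (a : α) (l : List α) :
    PySem.List.dedup (a :: l) = a :: (PySem.List.dedup l).filter (fun x => x ≠ a) := by
  have hofl : ∀ (m : List α), PySem.List.dedup m = m.foldl PySem.Set.add [] := by
    intro m
    rw [PySem.List.dedup_eq_ofList, PySem.Set.ofList_eq_foldl]
  rw [hofl, hofl]
  have hadd : PySem.Set.add ([] : List α) a = [a] := by
    simp [PySem.Set.add]
  calc (a :: l).foldl PySem.Set.add []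
      = l.foldl PySem.Set.add [a] := by rw [List.foldl_cons, hadd]
    _ = a :: (l.filter (fun x => x ≠ a)).foldl PySem.Set.add [] := pv_foldl_add_cons l [] a
    _ = a :: (l.foldl PySem.Set.add []).filter (fun x => x ≠ a) := by
        rw [pv_foldl_add_filter (fun x => x ≠ a) l []]; rfl

-- ===== VERDICT (by name: the statement is the Claim_ definition above) =====
theorem gera_lst_spec : Claim_equal_gera_lst := by
  intro chars _
  unfold Spec_gera_lst gera_lst gera_lst_alt
  rw [pv_foldl_append_map (fun i => [String.ofList (PySem.List.dedup
        (((([String.ofList (i :: chars.toList)] : List String).headD "").toList)))]) chars.toList []]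
  simp only [List.nil_append]
  apply List.map_congr_left
  intro i _
  simp only [List.headD_cons]
  rw [show (String.ofList (i :: chars.toList)).toList = i :: chars.toList from String.toList_ofList]
  rw [pv_dedup_cons]
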